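-- pv_equiv track=rewrite | github.com/Jaikumar3/promptmap | promptmap/transformers.py | _transform_whitespace
-- ===== SOURCE A (Python) =====
-- def _transform_whitespace(text: str) -> str:
--     """Insert zero-width characters between letters"""
--     zwsp = '\u200b'  # Zero-width space
--     result = []
--     for i, char in enumerate(text):
--         result.append(char)
--         if i % 3 == 0 and char != ' ':
--             result.append(zwsp)
--     return ''.join(result)
-- ===== SOURCE B (Python) =====
-- def _transform_whitespace(text: str) -> str:
--     """Insert zero-width characters between letters"""
--     zwsp = '\u200b'
--     parts = []
--     for i in range(0, len(text), 3):
--         chunk = text[i:i+3]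
--         head = chunk[0]
--         parts.append(head)
--         if head != ' ':
--             parts.append(zwsp)
--         parts.append(chunk[1:])
--     return ''.join(parts)
-- ===== Notes on version B (the rewrite author's own statement) =====
-- stated objective: alternative
-- what changed: Replaces the per-character enumerate loop with an index%3 test by slicing the text into chunks of 3 and inserting the zero-width space after each chunk's first non-space character.
import Mathlib
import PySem

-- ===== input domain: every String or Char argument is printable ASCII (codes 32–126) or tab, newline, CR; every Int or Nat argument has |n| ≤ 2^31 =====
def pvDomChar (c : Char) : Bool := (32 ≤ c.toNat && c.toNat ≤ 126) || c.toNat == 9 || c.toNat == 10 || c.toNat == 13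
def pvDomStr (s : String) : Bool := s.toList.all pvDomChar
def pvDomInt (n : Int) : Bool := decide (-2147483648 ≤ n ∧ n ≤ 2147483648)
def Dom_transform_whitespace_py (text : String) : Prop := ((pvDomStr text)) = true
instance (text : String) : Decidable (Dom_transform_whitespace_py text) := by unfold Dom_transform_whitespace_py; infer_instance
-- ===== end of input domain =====

-- B replaces A's per-character index-modulo scan by slicing the text into chunks of 3 and
-- inserting the zero-width space after each chunk's first character (same values; alternative decomposition).

-- ===== PORT A =====
-- A: enumerate the characters, append each, and after indices divisible by 3 (non-space char) append ZWSP.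
def transform_whitespace_py (text : String) : String :=
  String.mk ((PySem.List.enumerate text.toList).foldl
    (fun result ic =>
      let result := result ++ [ic.2]
      if PySem.Int.mod ic.1 3 == 0 && ic.2 != ' ' then result ++ ['\u200b'] else result)
    [])

-- ===== PORT B =====
-- B: walk the character list one 3-chunk at a time (chunk head, optional ZWSP, rest of the chunk).
def pvChunkGo : List Char → List Char
  | [] => []
  | head :: rest =>
      (head :: (if head ≠ ' ' then ['\u200b'] else []) ++ rest.take 2) ++ pvChunkGo (rest.drop 2)
  termination_by l => l.length
  decreasing_by simp [List.length_drop]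

def transform_whitespace_py_alt (text : String) : String :=
  String.mk (pvChunkGo text.toList)

-- ===== PRECONDITION & SPEC =====
def Spec_transform_whitespace_py (text : String) (out : String) : Prop := out = transform_whitespace_py_alt text
instance (text : String) (out : String) : Decidable (Spec_transform_whitespace_py text out) := by unfold Spec_transform_whitespace_py; infer_instance

-- ===== CLAIM (what is proved, stated in full; the proofs are below) =====
def Claim_equal_transform_whitespace_py : Prop := ∀ (text : String), Dom_transform_whitespace_py text → Spec_transform_whitespace_py text (transform_whitespace_py text)

-- ===== LEMMAS AND PROOFS =====

-- Nat-indexed characterisation of A's loop body output from position n onward.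
def pvG : Nat → List Char → List Char
  | _, [] => []
  | n, c :: rest =>
      c :: ((if n % 3 == 0 && c != ' ' then ['\u200b'] else []) ++ pvG (n + 1) rest)

theorem pvFoldA (l : List Char) : ∀ (n : Nat) (acc : List Char),
    (PySem.List.enumerate l (n : Int)).foldl
      (fun result ic =>
        let result := result ++ [ic.2]
        if PySem.Int.mod ic.1 3 == 0 && ic.2 != ' ' then result ++ ['\u200b'] else result)
      acc = acc ++ pvG n l := by
  induction l with
  | nil => intro n acc; simp [PySem.List.enumerate_nil, pvG]
  | cons c rest ih =>
    intro n acc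
    rw [PySem.List.enumerate_cons, List.foldl_cons]
    have hcast : ((n : Int) + 1) = ((n + 1 : Nat) : Int) := by push_cast; ring
    rw [hcast, ih]
    simp only [pvG]
    by_cases hsp : c = ' '
    · subst hsp; simp
    · by_cases h3 : n % 3 = 0
      · have hdvd : (3 : Int) ∣ (n : Int) := by omega
        simp [hdvd, h3, hsp]
      · have hndvd : ¬ (3 : Int) ∣ (n : Int) := by omega
        simp [hndvd, h3, hsp]

theorem pvG_eq_chunk : ∀ (n : Nat) (l : List Char), n % 3 = 0 → pvG n l = pvChunkGo l
  | _, [], _ => by simp [pvG, pvChunkGo]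
  | n, [c], h => by
    rw [pvChunkGo]
    simp [pvG, pvChunkGo, h]
  | n, [c, a], h => by
    have h1 : ¬ ((n + 1) % 3 = 0) := by omega
    rw [pvChunkGo]
    simp [pvG, pvChunkGo, h, h1]
  | n, c :: a :: b :: rest, h => by
    have h1 : ¬ ((n + 1) % 3 = 0) := by omega
    have h2 : ¬ ((n + 1 + 1) % 3 = 0) := by omega
    have ih := pvG_eq_chunk (n + 1 + 1 + 1) rest (by omega)
    rw [pvChunkGo]
    simp [pvG, h, h1, h2, ih]

-- ===== VERDICT (by name: the statement is the Claim_ definition above) =====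
theorem transform_whitespace_py_spec : Claim_equal_transform_whitespace_py := by
  intro text _
  unfold Spec_transform_whitespace_py transform_whitespace_py transform_whitespace_py_alt
  rw [← pvG_eq_chunk 0 text.toList rfl]
  congr 1
  have h := pvFoldA text.toList 0 []
  simpa using h
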